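-- pv_equiv track=rewrite | github.com/rayen-dhmaied/python-class-project | ex_pack/exercice_7.py | element_tableau
-- ===== SOURCE A (Python) =====
-- def element_tableau(T):
--     L=[]
--     for x in T:
--         ch=str(x)
--         for c in ch:
--             if int(c) not in L:
--                 L.append(int(c))
--     return L
-- ===== SOURCE B (Python) =====
-- def element_tableau(T):
--     s = "".join(str(x) for x in T)
--     return [int(d) for d in sorted((d for d in "0123456789" if d in s), key=s.find)]
-- ===== Notes on version B (the rewrite author's own statement) =====
-- stated objective: alternative
-- what changed: Instead of streaming every digit occurrence through a membership-tested accumulator, B concatenates the decimal strings once and, for each of the ten digits 0-9, tests presence and sorts the present digits by their first-occurrence index (str.find) in the concatenation.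
-- outside the precondition, e.g. on element_tableau([-3]): A raises ValueError, B returns [3]
-- crash fix: On any list containing a negative element A raises ValueError at int('-'); B returns the first-appearance list of the digits alone, ignoring the '-' sign (e.g. [-3] -> [3]). — e.g. on element_tableau([-3]): A raises ValueError, B returns [3]
import Mathlib
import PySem

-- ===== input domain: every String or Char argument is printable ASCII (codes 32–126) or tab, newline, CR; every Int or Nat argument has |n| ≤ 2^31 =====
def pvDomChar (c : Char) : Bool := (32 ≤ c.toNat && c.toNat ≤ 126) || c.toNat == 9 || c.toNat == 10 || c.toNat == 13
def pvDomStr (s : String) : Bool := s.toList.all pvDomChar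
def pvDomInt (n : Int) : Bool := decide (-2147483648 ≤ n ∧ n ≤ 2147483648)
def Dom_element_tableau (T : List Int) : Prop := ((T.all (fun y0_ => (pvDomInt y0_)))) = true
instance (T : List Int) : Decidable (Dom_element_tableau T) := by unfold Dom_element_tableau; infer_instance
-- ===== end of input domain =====

-- B replaces A's streaming membership-tested accumulator by a fixed-alphabet scan: it concatenates
-- all decimal strings once, keeps the digits 0-9 that occur, and sorts them by first-occurrence index.

-- int(c) for a single character c (total form; Pre_ keeps every element nonnegative, so c is a digit)
def pvDigit (c : Char) : Int := (PySem.Int.ofStr? (String.ofList [c])).getD 0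

-- ===== PORT A =====
def element_tableau (T : List Int) : List Int :=
  T.foldl (fun L x =>
    (PySem.Int.toStr x).toList.foldl (fun L c =>
      if pvDigit c ∈ L then L else L ++ [pvDigit c]) L) []

-- ===== PORT B =====
-- "0123456789", the alphabet B scans
def pvDigits : List Char := "0123456789".toList

def element_tableau_alt (T : List Int) : List Int :=
  let s := PySem.Chars.join [] (T.map (fun x => (PySem.Int.toStr x).toList))
  (PySem.List.sorted (pvDigits.filter (fun d => PySem.Chars.isIn [d] s))
      (fun d => PySem.Chars.find s [d]) false).map pvDigit

-- ===== PRECONDITION & SPEC =====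
-- Pre_ excludes lists containing a negative element: on those A raises ValueError at int('-').
def Pre_element_tableau (T : List Int) : Prop := ∀ x ∈ T, 0 ≤ x
instance (T : List Int) : Decidable (Pre_element_tableau T) := by unfold Pre_element_tableau; infer_instance
def pvWitness_element_tableau : List Int := [12, 305, 12, 2147483648]

-- On any list containing a negative element A raises ValueError (int('-')); B returns the
-- first-occurrence list of the digits alone, ignoring the '-' sign.
def Raises_element_tableau (T : List Int) : Prop := ∃ x ∈ T, x < 0
instance (T : List Int) : Decidable (Raises_element_tableau T) := by unfold Raises_element_tableau; infer_instance
def pvRaiseWitness_element_tableau : List Int := [-3]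
def pvRaiseWitnessOut_element_tableau : List Int := [3]

def Spec_element_tableau (T : List Int) (out : List Int) : Prop := out = element_tableau_alt T
instance (T : List Int) (out : List Int) : Decidable (Spec_element_tableau T out) := by unfold Spec_element_tableau; infer_instance

-- ===== CLAIM (what is proved, stated in full; the proofs are below) =====
def Claim_equal_element_tableau : Prop := ∀ (T : List Int), Dom_element_tableau T → Pre_element_tableau T → Spec_element_tableau T (element_tableau T)
def Claim_raises_element_tableau : Prop := (∀ (T : List Int), Dom_element_tableau T → Raises_element_tableau T → ¬ Pre_element_tableau T) ∧ (Dom_element_tableau (pvRaiseWitness_element_tableau) ∧ Raises_element_tableau (pvRaiseWitness_element_tableau) ∧ element_tableau_alt (pvRaiseWitness_element_tableau) = pvRaiseWitnessOut_element_tableau)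

-- ===== LEMMAS AND PROOFS =====

-- A's conditional-append step is exactly Set.add on the digit of c.
theorem pv_step_eq_add (L : List Int) (c : Char) :
    (if pvDigit c ∈ L then L else L ++ [pvDigit c]) = PySem.Set.add L (pvDigit c) := by
  simp [PySem.Set.add, PySem.Set.contains]

-- A's nested fold is the ordered dedup of the flattened digit stream.
theorem pv_A_eq_dedup (T : List Int) :
    element_tableau T =
      PySem.List.dedup (T.flatMap (fun x => (PySem.Int.toStr x).toList.map pvDigit)) := by
  rw [PySem.List.dedup_eq_ofList, PySem.Set.ofList_eq_foldl]
  unfold element_tableau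
  rw [List.foldl_flatMap]
  apply PySem.List.foldl_congr_mem
  intro L x _
  rw [List.foldl_map]
  apply PySem.List.foldl_congr_mem
  intro L' c _
  exact pv_step_eq_add L' c

-- folding Set.add from any accumulator = accumulator ++ the fresh part of the fold from []
theorem pv_foldl_add {α : Type} [DecidableEq α] (t : List α) :
    ∀ acc : List α, t.foldl PySem.Set.add acc
      = acc ++ (t.foldl PySem.Set.add []).filter (fun x => decide (x ∉ acc)) := by
  induction t with
  | nil => intro acc; simp
  | cons c t ih =>
    intro acc
    simp only [List.foldl_cons]
    rw [ih (PySem.Set.add acc c), ih (PySem.Set.add [] c)]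
    have h2 : PySem.Set.add ([] : List α) c = [c] := by simp [PySem.Set.add, PySem.Set.contains]
    by_cases hc : c ∈ acc
    · have h1 : PySem.Set.add acc c = acc := by simp [PySem.Set.add, PySem.Set.contains, hc]
      rw [h1, h2]
      simp only [List.filter_append, List.filter_filter]
      simp [hc]
      apply List.filter_congr
      intro x hx
      by_cases hxc : x = c <;> simp [hxc, hc]
    · have h1 : PySem.Set.add acc c = acc ++ [c] := by simp [PySem.Set.add, PySem.Set.contains, hc]
      rw [h1, h2]
      simp only [List.filter_append, List.filter_filter, List.append_assoc]
      simp [hc]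

-- first-occurrence dedup, cons form
theorem pv_dedup_cons {α : Type} [DecidableEq α] (c : α) (t : List α) :
    PySem.List.dedup (c :: t) = c :: (PySem.List.dedup t).filter (fun x => decide (x ≠ c)) := by
  have h2 : PySem.Set.add ([] : List α) c = [c] := by simp [PySem.Set.add, PySem.Set.contains]
  simp only [PySem.List.dedup_eq_ofList, PySem.Set.ofList_eq_foldl, List.foldl_cons, h2]
  rw [pv_foldl_add t [c]]
  simp

-- dedup commutes with a map injective on the list
theorem pv_dedup_map {α β : Type} [DecidableEq α] [DecidableEq β] (f : α → β) :
    ∀ (s : List α), (∀ a ∈ s, ∀ b ∈ s, f a = f b → a = b) →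
      PySem.List.dedup (s.map f) = (PySem.List.dedup s).map f := by
  intro s
  induction s with
  | nil => intro _; rfl
  | cons c t ih =>
    intro hinj
    rw [List.map_cons, pv_dedup_cons, pv_dedup_cons,
        ih (fun a ha b hb => hinj a (List.mem_cons_of_mem c ha) b (List.mem_cons_of_mem c hb)),
        List.filter_map]
    congr 1
    apply congrArg (List.map f)
    apply List.filter_congr
    intro x hx
    have hxt : x ∈ t := (PySem.List.mem_dedup t x).mp hx
    simp only [Function.comp_apply, decide_eq_decide]
    constructor
    · intro h he; exact h (he ▸ rfl)
    · intro h he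
      exact h (hinj x (List.mem_cons_of_mem c hxt) c (List.mem_cons_self) he)

-- before the first occurrence of a, a is absent
theorem pv_idxOf_min {α : Type} [DecidableEq α] (a : α) :
    ∀ (l : List α) (i : Nat), i < l.idxOf a → l[i]? ≠ some a := by
  intro l
  induction l with
  | nil => intro i h; simp at h
  | cons b t ih =>
    intro i h
    by_cases hab : a = b
    · subst hab; simp at h
    · rw [List.idxOf_cons_ne _ (fun he => hab he.symm)] at h
      cases i with
      | zero => simp; exact fun he => hab he.symm
      | succ j => simpa using ih j (by omega)

-- dedup lists its elements in order of first occurrence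
theorem pv_dedup_pairwise_idxOf {α : Type} [DecidableEq α] :
    ∀ s : List α, (PySem.List.dedup s).Pairwise (fun a b => s.idxOf a < s.idxOf b) := by
  intro s
  induction s with
  | nil => simp [PySem.List.dedup, PySem.Set.ofList]
  | cons c t ih =>
    rw [pv_dedup_cons]
    constructor
    · intro b hb
      have hbne : b ≠ c := by have := List.of_mem_filter hb; simpa using this
      rw [List.idxOf_cons_self, List.idxOf_cons_ne _ (fun he => hbne he.symm)]
      omega
    · have hf := List.Pairwise.filter (fun x => decide (x ≠ c)) ih
      apply hf.imp_of_mem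
      intro a b ha hb hlt
      have hane : a ≠ c := by have := List.of_mem_filter ha; simpa using this
      have hbne : b ≠ c := by have := List.of_mem_filter hb; simpa using this
      rw [List.idxOf_cons_ne _ (fun he => hane he.symm), List.idxOf_cons_ne _ (fun he => hbne he.symm)]
      omega

-- [a] is a prefix exactly of lists that start with a
theorem pv_singleton_prefix (a : Char) (u : List Char) : [a] <+: u ↔ u.head? = some a := by
  cases u with
  | nil => simp
  | cons b v => simp [List.cons_prefix_cons, eq_comm]

-- for a character present in s, str.find is the index of the first occurrence
theorem pv_find_eq_idxOf (s : List Char) (a : Char) (h : a ∈ s) :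
    PySem.Chars.find s [a] = (s.idxOf a : Int) := by
  have h0 : 0 ≤ PySem.Chars.find s [a] :=
    (PySem.Chars.find_nonneg_iff s [a]).mpr ((List.singleton_infix_iff a s).mpr h)
  obtain ⟨hpre, hmin⟩ := PySem.Chars.find_spec h0
  set n := (PySem.Chars.find s [a]).toNat with hn
  have hsome : s[n]? = some a := by
    rw [← List.head?_drop]; exact (pv_singleton_prefix a _).mp hpre
  have hidx : s[s.idxOf a]? = some a := List.getElem?_idxOf h
  have h1 : ¬ n < s.idxOf a := fun hlt => pv_idxOf_min a s n hlt hsome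
  have h2 : ¬ s.idxOf a < n := by
    intro hlt
    exact hmin _ hlt ((pv_singleton_prefix a _).mpr (by rw [List.head?_drop]; exact hidx))
  omega

-- ''.join is concatenation
theorem pv_join_nil (parts : List (List Char)) :
    PySem.Chars.join [] parts = parts.flatten := by
  simp only [PySem.Chars.join, List.intercalate]
  induction parts with
  | nil => rfl
  | cons p ps ih =>
    cases ps with
    | nil => simp
    | cons q t => simp [List.intersperse] at *; exact ih

-- every character Nat.toDigitsCore emits is a decimal digit
theorem pv_digitChar_mem (n : Nat) (h : n < 10) : Nat.digitChar n ∈ pvDigits := by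
  interval_cases n <;> decide

theorem pv_toDigitsCore_mem :
    ∀ (fuel n : Nat) (acc : List Char), (∀ c ∈ acc, c ∈ pvDigits) →
      ∀ c ∈ Nat.toDigitsCore 10 fuel n acc, c ∈ pvDigits := by
  intro fuel
  induction fuel with
  | zero => intro n acc hacc c hc; exact hacc c hc
  | succ f ih =>
    intro n acc hacc c hc
    rw [Nat.toDigitsCore] at hc
    by_cases h10 : n / 10 = 0
    · simp [h10] at hc
      rcases hc with h | h
      · exact h ▸ pv_digitChar_mem _ (Nat.mod_lt _ (by norm_num))
      · exact hacc c h
    · simp [h10] at hc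
      refine ih _ _ ?_ c hc
      intro d hd
      rcases List.mem_cons.mp hd with h | h
      · exact h ▸ pv_digitChar_mem _ (Nat.mod_lt _ (by norm_num))
      · exact hacc d h

-- every character of str(n) for 0 ≤ n is a decimal digit
theorem pv_toStr_digits (n : Int) (h : 0 ≤ n) :
    ∀ c ∈ (PySem.Int.toStr n).toList, c ∈ pvDigits := by
  rw [PySem.Int.toList_toStr]
  unfold PySem.Int.toChars
  rw [if_neg (by omega)]
  exact pv_toDigitsCore_mem _ _ _ (by simp)

theorem pvDigits_eq : pvDigits = ['0','1','2','3','4','5','6','7','8','9'] := by decide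

-- int(·) is injective on single digit characters
theorem pv_digit_inj : ∀ a ∈ pvDigits, ∀ b ∈ pvDigits, pvDigit a = pvDigit b → a = b := by
  rw [pvDigits_eq]
  intro a ha b hb h
  fin_cases ha <;> fin_cases hb <;> first | rfl | (exfalso; revert h; decide)

-- ===== VERDICT (by name: the statements are the Claim_ definitions above) =====
theorem element_tableau_spec : Claim_equal_element_tableau := by
  intro T _ hPre
  unfold Spec_element_tableau element_tableau_alt
  have hsflat : PySem.Chars.join [] (T.map (fun x => (PySem.Int.toStr x).toList))
      = T.flatMap (fun x => (PySem.Int.toStr x).toList) := by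
    rw [pv_join_nil, ← List.flatMap_def]
  rw [hsflat]
  set s : List Char := T.flatMap (fun x => (PySem.Int.toStr x).toList) with hs
  have hsd : ∀ c ∈ s, c ∈ pvDigits := by
    intro c hc
    obtain ⟨x, hx, hcx⟩ := List.mem_flatMap.mp hc
    exact pv_toStr_digits x (hPre x hx) c hcx
  have hinj : ∀ a ∈ s, ∀ b ∈ s, pvDigit a = pvDigit b → a = b :=
    fun a ha b hb => pv_digit_inj a (hsd a ha) b (hsd b hb)
  have hstream : T.flatMap (fun x => (PySem.Int.toStr x).toList.map pvDigit) = s.map pvDigit := by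
    rw [hs, List.map_flatMap]
  rw [pv_A_eq_dedup, hstream, pv_dedup_map pvDigit s hinj]
  congr 1
  refine (PySem.List.sorted_eq_of_perm_of_pairwise_lt _ (PySem.List.dedup s) _ ?_ ?_).symm
  · apply (List.perm_ext_iff_of_nodup (PySem.List.nodup_dedup s)
      ((by decide : pvDigits.Nodup).filter _)).mpr
    intro a
    rw [PySem.List.mem_dedup, List.mem_filter]
    constructor
    · intro ha
      exact ⟨hsd a ha, (PySem.Chars.isIn_iff_infix [a] s).mpr ((List.singleton_infix_iff a s).mpr ha)⟩
    · rintro ⟨-, hin⟩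
      exact (List.singleton_infix_iff a s).mp ((PySem.Chars.isIn_iff_infix [a] s).mp hin)
  · apply (pv_dedup_pairwise_idxOf s).imp_of_mem
    intro a b ha hb hlt
    have ha' := (PySem.List.mem_dedup s a).mp ha
    have hb' := (PySem.List.mem_dedup s b).mp hb
    rw [pv_find_eq_idxOf s a ha', pv_find_eq_idxOf s b hb']
    exact_mod_cast hlt

theorem element_tableau_raises : Claim_raises_element_tableau := by
  unfold Claim_raises_element_tableau
  exact ⟨fun T _ ⟨x, hx, hneg⟩ hPre => absurd (hPre x hx) (by omega), by decide⟩

-- self-check: the raise witness indeed lies in Raises_ and B's port returns the stated literal there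
theorem pvRaiseWitness_element_tableau_ok :
    Raises_element_tableau pvRaiseWitness_element_tableau ∧
      element_tableau_alt pvRaiseWitness_element_tableau = pvRaiseWitnessOut_element_tableau :=
  ⟨element_tableau_raises.2.2.1, element_tableau_raises.2.2.2⟩
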